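-- pv_equiv track=rewrite | github.com/mike2vandy/sternlab_tools | af_analysis.py | reduce_CSQ
-- ===== SOURCE A (Python) =====
-- def reduce_CSQ(csqs, csq_indices):
--   if isinstance(csqs, str):
--     csqs = csqs.split(',')
--
--   updated = []
--   for conseq in csqs:
--     record = conseq.split('|')
--     new_record = []
--     for i in record:
--       if '&' in i:
--         new_record.append(i.split('&')[0])
--       else:
--         new_record.append(i)
--     result = ','.join([new_record[i] for i in csq_indices])
--     updated.append(result)
--
--   return updated
-- ===== SOURCE B (Python) =====
-- def reduce_CSQ(csqs, csq_indices):
--   if isinstance(csqs, str):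
--     csqs = csqs.split(',')
--
--   updated = []
--   for conseq in csqs:
--     fields = conseq.split('|')
--     updated.append(','.join(fields[i].split('&')[0] for i in csq_indices))
--   return updated
-- ===== Notes on version B (the rewrite author's own statement) =====
-- stated objective: simpler
-- what changed: B drops A's full trim pass and its if/else branch: instead of building a trimmed copy of every field and then indexing into it, B indexes the raw split record and trims only the selected fields with split('&')[0], which already returns the whole string when no '&' is present.
import Mathlib
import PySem

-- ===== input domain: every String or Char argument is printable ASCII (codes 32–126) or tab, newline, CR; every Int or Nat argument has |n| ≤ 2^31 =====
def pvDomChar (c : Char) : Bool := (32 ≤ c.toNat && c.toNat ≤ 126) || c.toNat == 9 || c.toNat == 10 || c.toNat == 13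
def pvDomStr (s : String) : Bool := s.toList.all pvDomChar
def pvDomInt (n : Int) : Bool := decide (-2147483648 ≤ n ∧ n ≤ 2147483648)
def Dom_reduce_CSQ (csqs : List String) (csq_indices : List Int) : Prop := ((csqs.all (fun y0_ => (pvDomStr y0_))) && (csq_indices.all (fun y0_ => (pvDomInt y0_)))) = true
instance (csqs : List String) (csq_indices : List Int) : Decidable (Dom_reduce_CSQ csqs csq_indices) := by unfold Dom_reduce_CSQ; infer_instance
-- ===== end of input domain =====

-- B drops A's full per-field trim pass and its if/else branch: it indexes the raw split record and
-- trims only the selected fields with split('&')[0] (objective: simpler). Return-value equivalence only.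

-- ===== PORT A =====
-- (csqs : List String, so Python's 'isinstance(csqs, str)' branch cannot fire and is not ported)
def reduce_CSQ (csqs : List String) (csq_indices : List Int) : List String :=
  csqs.foldl (fun updated conseq =>
    let record := (PySem.Str.split? conseq "|").getD []          -- conseq.split('|'); sep "|" ≠ "" so split? is always some
    let new_record := record.foldl (fun nr i =>
      if PySem.Str.isIn "&" i then
        nr ++ [PySem.List.pyGetD ((PySem.Str.split? i "&").getD []) 0 ""]  -- i.split('&')[0]
      else
        nr ++ [i]) []
    let result := PySem.Str.join "," (csq_indices.map (fun i => PySem.List.pyGetD new_record i ""))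
    updated ++ [result]) []

-- ===== PORT B =====
def reduce_CSQ_alt (csqs : List String) (csq_indices : List Int) : List String :=
  csqs.map (fun conseq =>
    let fields := (PySem.Str.split? conseq "|").getD []
    PySem.Str.join "," (csq_indices.map (fun i =>
      PySem.List.pyGetD ((PySem.Str.split? (PySem.List.pyGetD fields i "") "&").getD []) 0 "")))

-- ===== PRECONDITION & SPEC =====
-- Pre_ excludes exactly the inputs where Python A raises IndexError: an index in csq_indices out of
-- range for some record's '|'-split field list (B raises there too).
def Pre_reduce_CSQ (csqs : List String) (csq_indices : List Int) : Prop :=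
  ∀ conseq ∈ csqs, ∀ i ∈ csq_indices,
    PySem.Raise.InRange ((PySem.Str.split? conseq "|").getD []).length i
instance (csqs : List String) (csq_indices : List Int) : Decidable (Pre_reduce_CSQ csqs csq_indices) := by
  unfold Pre_reduce_CSQ; infer_instance

def pvWitness_reduce_CSQ : List String × List Int := (["a|b&c|d", "x&y|z"], [0, 1])

def Spec_reduce_CSQ (csqs : List String) (csq_indices : List Int) (out : List String) : Prop := out = reduce_CSQ_alt csqs csq_indices
instance (csqs : List String) (csq_indices : List Int) (out : List String) : Decidable (Spec_reduce_CSQ csqs csq_indices out) := by unfold Spec_reduce_CSQ; infer_instance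

-- ===== CLAIM (what is proved, stated in full; the proofs are below) =====
def Claim_equal_reduce_CSQ : Prop := ∀ (csqs : List String) (csq_indices : List Int), Dom_reduce_CSQ csqs csq_indices → Pre_reduce_CSQ csqs csq_indices → Spec_reduce_CSQ csqs csq_indices (reduce_CSQ csqs csq_indices)

-- ===== LEMMAS AND PROOFS =====

-- splitOn.go never meets the separator when sep is not an infix of the remaining input,
-- so it just accumulates the whole input as one piece.
theorem go_no_infix (sep : List Char) : ∀ (fuel : Nat) (l cur : List Char) (acc : List (List Char)),
    l.length ≤ fuel → ¬ (sep <:+: l) →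
    PySem.Chars.splitOn.go sep fuel l cur acc = ((cur.reverse ++ l) :: acc).reverse := by
  intro fuel
  induction fuel with
  | zero =>
      intro l cur acc hl _
      have : l = [] := List.length_eq_zero_iff.mp (Nat.le_zero.mp hl)
      subst this
      rw [PySem.Chars.splitOn.go]
  | succ n ih =>
      intro l cur acc hl hinf
      cases l with
      | nil => rw [PySem.Chars.splitOn.go] <;> simp
      | cons c rest =>
          rw [PySem.Chars.splitOn.go]
          have hpre : sep.isPrefixOf (c :: rest) = false := by
            by_contra h
            exact hinf ((List.isPrefixOf_iff_prefix.mp (by simpa using h)).isInfix)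
          simp only [hpre, Bool.false_eq_true, if_false]
          rw [ih rest (c :: cur) acc (by simpa [Nat.succ_le_succ_iff] using hl)
              (fun h => hinf (h.trans (List.suffix_cons c rest).isInfix))]
          simp

-- Python's x.split('&')[0] is x itself when '&' is not in x.
theorem split_amp_no_amp (x : String) (h : PySem.Str.isIn "&" x = false) :
    PySem.List.pyGetD ((PySem.Str.split? x "&").getD []) 0 "" = x := by
  have hinf : ¬ ("&".toList <:+: x.toList) := by
    rw [PySem.Str.isIn_eq] at h
    exact (PySem.Chars.isIn_eq_false_iff _ _).mp h
  have hsplit : PySem.Chars.split? x.toList "&".toList = some [x.toList] := by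
    unfold PySem.Chars.split? PySem.Chars.splitOn
    rw [go_no_infix _ _ _ _ _ (Nat.le_succ _) hinf]
    simp
  have hmap := PySem.Str.split?_map x "&"
  rw [hsplit] at hmap
  cases hs : PySem.Str.split? x "&" with
  | none => rw [hs] at hmap; simp at hmap
  | some ys =>
      rw [hs] at hmap
      simp at hmap
      match ys, hmap with
      | [y], hy =>
          have : y = x := String.toList_inj.mp (by simpa using hy)
          simp [this, PySem.List.pyGetD_zero_cons]

-- Indexing the trimmed copy of the record equals trimming the indexed raw field
-- (PySem.List.pyGetD_map, with split('&')[0] mapping the default "" to "").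
theorem pyGetD_map_sp (xs : List String) (i : Int) :
    PySem.List.pyGetD (xs.map (fun x => PySem.List.pyGetD ((PySem.Str.split? x "&").getD []) 0 "")) i ""
    = PySem.List.pyGetD ((PySem.Str.split? (PySem.List.pyGetD xs i "") "&").getD []) 0 "" := by
  have h := PySem.List.pyGetD_map (fun x => PySem.List.pyGetD ((PySem.Str.split? x "&").getD []) 0 "") xs i ""
  have e : PySem.List.pyGetD ((PySem.Str.split? "" "&").getD []) 0 "" = "" := by decide
  rw [e] at h
  exact h

-- ===== VERDICT (by name: the statement is the Claim_ definition above) =====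
theorem reduce_CSQ_spec : Claim_equal_reduce_CSQ := by
  intro csqs csq_indices _ _
  unfold Spec_reduce_CSQ reduce_CSQ reduce_CSQ_alt
  rw [PySem.List.foldl_append_singleton_eq_map]
  simp only [List.nil_append]
  apply List.map_congr_left
  intro c _
  rw [show (fun (nr : List String) (i : String) =>
        if PySem.Str.isIn "&" i then
          nr ++ [PySem.List.pyGetD ((PySem.Str.split? i "&").getD []) 0 ""]
        else nr ++ [i])
      = (fun nr i => nr ++ [if PySem.Str.isIn "&" i then
          PySem.List.pyGetD ((PySem.Str.split? i "&").getD []) 0 "" else i]) from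
      funext fun nr => funext fun i => by split <;> rfl]
  rw [PySem.List.foldl_append_singleton_eq_map]
  simp only [List.nil_append]
  rw [show (fun x => if PySem.Str.isIn "&" x then
        PySem.List.pyGetD ((PySem.Str.split? x "&").getD []) 0 "" else x)
      = (fun x => PySem.List.pyGetD ((PySem.Str.split? x "&").getD []) 0 "") from
      funext fun x => by
        by_cases h : PySem.Str.isIn "&" x = true
        · rw [if_pos h]
        · rw [if_neg h, split_amp_no_amp x (by simpa using h)]]
  congr 1
  apply List.map_congr_left
  intro i _
  exact pyGetD_map_sp _ i
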